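-- pv_equiv track=rewrite | github.com/Project-team-Null/Algo-Rhythm-Study | baekjoon/Class3/케빈_베이컨의_6단계_법칙/상준.py | bfs
-- ===== SOURCE A (Python) =====
-- from collections import deque
--
-- def bfs(graph, n):
--     ret = []
--     for i in range(1, n+1):
--         que = deque([(i, 0)])
--         visited = set()
--         ans = 0
--         while len(que) != 0:
--             user, step = que.popleft()
--             if user not in visited:
--                 visited.add(user)
--                 ans += step
--                 for child in graph[user]:
--                     que.append((child, step+1))
--         ret.append(ans)
--     return ret
-- ===== SOURCE B (Python) =====
-- def _reach_sum(graph, src):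
--     seen = {src}
--     frontier = [src]
--     level = total = 0
--     while frontier:
--         total += level * len(frontier)
--         nxt = []
--         for node in frontier:
--             for child in graph[node]:
--                 if child not in seen:
--                     seen.add(child)
--                     nxt.append(child)
--         frontier = nxt
--         level += 1
--     return total
--
--
-- def bfs(graph, n):
--     return [_reach_sum(graph, i) for i in range(1, n + 1)]
-- ===== Notes on version B (the rewrite author's own statement) =====
-- stated objective: faster
-- what changed: Replaces the (node, step)-tuple queue that enqueues every neighbour of every visited node and discards already-visited entries at pop time with a level-synchronous BFS: a frontier list per distance level, a seen-set checked at discovery time so each node is enqueued at most once, and the level counter added once per frontier node.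
-- outside the precondition, e.g. on bfs({1: [], 2: [7]}, 1): A returns [0], B returns [0]
import Mathlib
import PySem

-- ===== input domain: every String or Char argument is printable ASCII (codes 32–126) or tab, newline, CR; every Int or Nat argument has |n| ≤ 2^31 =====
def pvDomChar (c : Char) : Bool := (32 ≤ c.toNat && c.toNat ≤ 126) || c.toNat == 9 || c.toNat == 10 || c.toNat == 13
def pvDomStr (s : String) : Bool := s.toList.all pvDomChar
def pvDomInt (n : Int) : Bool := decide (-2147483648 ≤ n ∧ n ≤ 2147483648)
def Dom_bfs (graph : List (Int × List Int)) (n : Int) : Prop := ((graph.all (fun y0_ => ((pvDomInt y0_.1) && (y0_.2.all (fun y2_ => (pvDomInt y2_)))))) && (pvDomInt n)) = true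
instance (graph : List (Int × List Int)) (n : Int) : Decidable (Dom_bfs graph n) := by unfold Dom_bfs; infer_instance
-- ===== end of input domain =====

-- B replaces A's (node, step) tuple queue (which enqueues every neighbour and drops visited
-- entries at pop time) by a level-synchronous BFS with a seen-set checked at discovery time,
-- so each node is enqueued at most once (a constant-factor saving in queue churn).


-- ===== PORT A =====

-- graph[u] for the dict argument (first-match association-list lookup; none = KeyError)
def pvAdj? (graph : List (Int × List Int)) (u : Int) : Option (List Int) :=
  (PySem.Dict.mk graph).get? u

-- graph[u] with default [] (exact wherever Pre_ guarantees the key exists)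
def pvAdjD (graph : List (Int × List Int)) (u : Int) : List Int :=
  (pvAdj? graph u).getD []

-- every int a BFS can ever mark: the dict's keys and every listed neighbour (termination measure only)
def pvUniv (graph : List (Int × List Int)) : List Int :=
  graph.map Prod.fst ++ graph.flatMap Prod.snd

-- number of universe entries not yet in the visited/seen set (termination measure)
def pvUC (graph : List (Int × List Int)) (V : PySem.Set Int) : Nat :=
  ((pvUniv graph).filter (fun x => !(PySem.Set.contains V x))).length

lemma pvFilter_lt {l : List Int} {p q : Int → Bool} (h : ∀ x, q x = true → p x = true)
    (u : Int) (hu : u ∈ l) (hp : p u = true) (hq : q u = false) :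
    (l.filter q).length < (l.filter p).length := by
  induction l with
  | nil => cases hu
  | cons a t ih =>
    rcases List.mem_cons.mp hu with rfl | hmem
    · simp only [List.filter_cons, hp, hq, if_true, if_false, Bool.false_eq_true, List.length_cons]
      exact Nat.lt_succ_of_le (List.Sublist.length_le (List.monotone_filter_right t h))
    · have hlt := ih hmem
      by_cases ha : q a = true
      · have hpa := h a ha
        simp only [List.filter_cons, ha, hpa, if_true, List.length_cons]
        omega
      · cases hpa : p a <;>
          simp only [List.filter_cons, ha, hpa, Bool.false_eq_true, if_false, if_true,
            List.length_cons] <;> omega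

lemma pvUC_lt (g : List (Int × List Int)) (V W : PySem.Set Int)
    (hsub : ∀ x, x ∈ V → x ∈ W) (u : Int) (hu : u ∈ pvUniv g) (huV : u ∉ V) (huW : u ∈ W) :
    pvUC g W < pvUC g V := by
  refine pvFilter_lt ?_ u hu ?_ ?_
  · intro x hx
    simp only [Bool.not_eq_true'] at hx ⊢
    simp only [PySem.Set.contains_eq_listContains] at hx ⊢
    simp only [List.contains_eq_mem, decide_eq_false_iff_not] at hx ⊢
    exact fun hv => hx (hsub x hv)
  · simpa using huV
  · simpa using huW

lemma pvMem_univ_of_adj?_some {g : List (Int × List Int)} {u : Int} {ch : List Int}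
    (h : pvAdj? g u = some ch) : u ∈ pvUniv g := by
  have hm : (u, ch) ∈ g := by
    simpa using PySem.Dict.mem_items_of_get?_eq_some (PySem.Dict.mk g) h
  exact List.mem_append_left _ (List.mem_map_of_mem hm)

def bfsLoopA (graph : List (Int × List Int)) (que : List (Int × Int))
    (visited : PySem.Set Int) (ans : Int) : Int :=
  match que with
  | [] => ans
  | (user, step) :: rest =>
    if h1 : PySem.Set.contains visited user = true then
      bfsLoopA graph rest visited ans
    else
      match h2 : pvAdj? graph user with
      | none => ans   -- Python raises KeyError here; Pre_ excludes it
      | some children =>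
        bfsLoopA graph (rest ++ children.map (fun c => (c, step + 1)))
          (PySem.Set.add visited user) (ans + step)
termination_by (pvUC graph visited, que.length)
decreasing_by
  · apply Prod.Lex.right
    simp
  · apply Prod.Lex.left
    refine pvUC_lt graph visited (PySem.Set.add visited user) ?_ user
      (pvMem_univ_of_adj?_some h2) ?_ ?_
    · intro x hx; exact (PySem.Set.mem_add visited user x).mpr (Or.inl hx)
    · intro hmem
      exact h1 ((PySem.Set.contains_iff visited user).mpr hmem)
    · exact (PySem.Set.mem_add visited user user).mpr (Or.inr rfl)

def bfs (graph : List (Int × List Int)) (n : Int) : List Int :=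
  (PySem.List.pyRange 1 (n + 1) 1).foldl
    (fun ret i => ret ++ [bfsLoopA graph [(i, 0)] PySem.Set.empty 0]) []

-- ===== PORT B =====

-- proof/termination helper: the elements of a list not yet in V, first occurrences, marking as it goes
def pvNew (V : PySem.Set Int) : List Int → List Int
  | [] => []
  | x :: xs => if PySem.Set.contains V x then pvNew V xs else x :: pvNew (PySem.Set.add V x) xs

-- inner 'for child in graph[node]' loop of _reach_sum
def bGather (seen : PySem.Set Int) (nxt : List Int) : List Int → PySem.Set Int × List Int
  | [] => (seen, nxt)
  | c :: cs =>
    if PySem.Set.contains seen c then bGather seen nxt cs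
    else bGather (PySem.Set.add seen c) (nxt ++ [c]) cs

-- outer 'for node in frontier' loop; graph[node]: Python raises on a missing key, Pre_ rules that out
def bOuter (graph : List (Int × List Int)) (seen : PySem.Set Int) (nxt : List Int) :
    List Int → PySem.Set Int × List Int
  | [] => (seen, nxt)
  | u :: us =>
    let p := bGather seen nxt (pvAdjD graph u)
    bOuter graph p.1 p.2 us

lemma bGather_eq (s : PySem.Set Int) (n cs : List Int) :
    bGather s n cs = (PySem.Set.update s (pvNew s cs), n ++ pvNew s cs) := by
  induction cs generalizing s n with
  | nil => simp [bGather, pvNew, PySem.Set.update_nil]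
  | cons c cs ih =>
    by_cases hc : c ∈ s
    · simp [bGather, pvNew, hc, ih]
    · simp [bGather, pvNew, hc, ih, PySem.Set.update_cons, List.append_assoc]

lemma pvNew_append (V : PySem.Set Int) (xs ys : List Int) :
    pvNew V (xs ++ ys) = pvNew V xs ++ pvNew (PySem.Set.update V (pvNew V xs)) ys := by
  induction xs generalizing V with
  | nil => simp [pvNew, PySem.Set.update_nil]
  | cons x xs ih =>
    by_cases hx : x ∈ V
    · simp [pvNew, hx, ih]
    · simp [pvNew, hx, ih, PySem.Set.update_cons]

lemma bOuter_eq (g : List (Int × List Int)) (s : PySem.Set Int) (n F : List Int) :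
    bOuter g s n F = (PySem.Set.update s (pvNew s (F.flatMap (pvAdjD g))),
      n ++ pvNew s (F.flatMap (pvAdjD g))) := by
  induction F generalizing s n with
  | nil => simp [bOuter, pvNew, PySem.Set.update_nil]
  | cons u us ih =>
    simp [bOuter, bGather_eq, ih, List.flatMap_cons, pvNew_append, PySem.Set.update_append,
      List.append_assoc]

lemma pvNew_sub {V : PySem.Set Int} {l : List Int} {x : Int} (h : x ∈ pvNew V l) :
    x ∈ l ∧ x ∉ V := by
  induction l generalizing V with
  | nil => simp [pvNew] at h
  | cons y ys ih =>
    by_cases hy : y ∈ V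
    · simp only [pvNew] at h
      rw [if_pos (by simpa using hy)] at h
      obtain ⟨h1, h2⟩ := ih h
      exact ⟨List.mem_cons_of_mem _ h1, h2⟩
    · simp only [pvNew] at h
      rw [if_neg (by simpa using hy)] at h
      rcases List.mem_cons.mp h with rfl | h'
      · exact ⟨List.mem_cons_self, hy⟩
      · obtain ⟨h1, h2⟩ := ih h'
        exact ⟨List.mem_cons_of_mem _ h1,
          fun hv => h2 ((PySem.Set.mem_add V y x).mpr (Or.inl hv))⟩

lemma pvMem_univ_of_mem_adjD {g : List (Int × List Int)} {v e : Int}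
    (h : e ∈ pvAdjD g v) : e ∈ pvUniv g := by
  unfold pvAdjD at h
  cases h' : pvAdj? g v with
  | none => rw [h'] at h; cases h
  | some ch =>
    rw [h'] at h
    have hm : (v, ch) ∈ g := by
      simpa using PySem.Dict.mem_items_of_get?_eq_some (PySem.Dict.mk g) h'
    exact List.mem_append_right _ (List.mem_flatMap.mpr ⟨(v, ch), hm, h⟩)

-- while-loop of _reach_sum, one level per call
def bLoopB (graph : List (Int × List Int)) (frontier : List Int) (seen : PySem.Set Int)
    (level total : Int) : Int :=
  if h : frontier = [] then total
  else
    let total' := total + level * (frontier.length : Int)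
    let p := bOuter graph seen [] frontier
    bLoopB graph p.2 p.1 (level + 1) total'
termination_by (pvUC graph seen, frontier.length)
decreasing_by
  rw [bOuter_eq]
  rcases hE : pvNew seen (frontier.flatMap (pvAdjD graph)) with _ | ⟨e, E'⟩
  · apply Prod.Lex.right
    simp [List.length_pos_iff]
    exact h
  · apply Prod.Lex.left
    have he : e ∈ pvNew seen (frontier.flatMap (pvAdjD graph)) := by
      rw [hE]; exact List.mem_cons_self
    obtain ⟨hel, hns⟩ := pvNew_sub he
    obtain ⟨v, hv, hev⟩ := List.mem_flatMap.mp hel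
    refine pvUC_lt graph seen _ ?_ e (pvMem_univ_of_mem_adjD hev) hns ?_
    · intro x hx; exact (PySem.Set.mem_update seen _ x).mpr (Or.inl hx)
    · exact (PySem.Set.mem_update seen _ e).mpr (Or.inr List.mem_cons_self)


def bfs_alt (graph : List (Int × List Int)) (n : Int) : List Int :=
  (PySem.List.pyRange 1 (n + 1) 1).map
    (fun i => bLoopB graph [i] (PySem.Set.ofList [i]) 0 0)

-- ===== PRECONDITION & SPEC =====
-- Pre_ excludes exactly the KeyError-shaped inputs; to stay closed-form it requires every
-- listed neighbour of EVERY entry to be a key, which also excludes some graphs A returns on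
-- (a dangling neighbour of an entry the BFS never reaches).  The first conjunct says every
-- source 1..n is a key, phrased by counting the distinct keys inside [1, n].
-- (for n ≤ 0 the source range is empty and A returns [] on any graph, so those are all admitted)
def Pre_bfs (graph : List (Int × List Int)) (n : Int) : Prop :=
  n ≤ 0 ∨
  (((((PySem.Set.ofList (graph.map Prod.fst)).filter
      (fun k => decide (1 ≤ k ∧ k ≤ n))).length : Int) = n) ∧
  (∀ p ∈ graph, ∀ v ∈ p.2, (pvAdj? graph v).isSome = true))
instance (graph : List (Int × List Int)) (n : Int) : Decidable (Pre_bfs graph n) := by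
  unfold Pre_bfs; infer_instance

def pvWitness_bfs : (List (Int × List Int)) × Int := ([(1, [2]), (2, [1, 2]), (3, [])], 3)

def Spec_bfs (graph : List (Int × List Int)) (n : Int) (out : List Int) : Prop := out = bfs_alt graph n
instance (graph : List (Int × List Int)) (n : Int) (out : List Int) : Decidable (Spec_bfs graph n out) := by unfold Spec_bfs; infer_instance

-- ===== CLAIM (what is proved, stated in full; the proofs are below) =====
def Claim_equal_bfs : Prop := ∀ (graph : List (Int × List Int)) (n : Int), Dom_bfs graph n → Pre_bfs graph n → Spec_bfs graph n (bfs graph n)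

-- ===== LEMMAS AND PROOFS =====

lemma bfsLoopA_nil (g : List (Int × List Int)) (V : PySem.Set Int) (a : Int) :
    bfsLoopA g [] V a = a := by
  rw [bfsLoopA]

lemma bfsLoopA_cons_visited {g : List (Int × List Int)} {V : PySem.Set Int} {u : Int}
    (st : Int) (rest : List (Int × Int)) (a : Int) (h1 : u ∈ V) :
    bfsLoopA g ((u, st) :: rest) V a = bfsLoopA g rest V a := by
  rw [bfsLoopA]; simp [h1]

lemma bfsLoopA_cons_new {g : List (Int × List Int)} {V : PySem.Set Int} {u : Int} {ch : List Int}
    (st : Int) (rest : List (Int × Int)) (a : Int)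
    (h1 : u ∉ V) (h2 : pvAdj? g u = some ch) :
    bfsLoopA g ((u, st) :: rest) V a
      = bfsLoopA g (rest ++ ch.map (fun c => (c, st + 1))) (PySem.Set.add V u) (a + st) := by
  rw [bfsLoopA]
  rw [dif_neg (by simpa using h1)]
  split
  · rename_i heq; rw [h2] at heq; cases heq
  · rename_i children heq; rw [h2] at heq; cases heq; rfl

lemma bLoopB_nil (g : List (Int × List Int)) (S : PySem.Set Int) (lv t : Int) :
    bLoopB g [] S lv t = t := by
  rw [bLoopB]; simp

lemma bLoopB_cons {g : List (Int × List Int)} {F : List Int} (S : PySem.Set Int) (lv t : Int)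
    (h : F ≠ []) :
    bLoopB g F S lv t
      = bLoopB g (bOuter g S [] F).2 (bOuter g S [] F).1 (lv + 1)
          (t + lv * (F.length : Int)) := by
  rw [bLoopB]; simp [h]

lemma pvNotMem_add {V : PySem.Set Int} {x y : Int}
    (h : y ∉ PySem.Set.add V x) : y ∉ V :=
  fun hv => h ((PySem.Set.mem_add V x y).mpr (Or.inl hv))

lemma pvAdj?_closed {g : List (Int × List Int)}
    (hclosed : ∀ p ∈ g, ∀ v ∈ p.2, (pvAdj? g v).isSome = true)
    {u e : Int} (h : e ∈ pvAdjD g u) : (pvAdj? g e).isSome = true := by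
  unfold pvAdjD at h
  cases h' : pvAdj? g u with
  | none => rw [h'] at h; cases h
  | some ch =>
    rw [h'] at h
    have hm : (u, ch) ∈ g := by
      simpa using PySem.Dict.mem_items_of_get?_eq_some (PySem.Dict.mk g) h'
    exact hclosed (u, ch) hm e h

-- one level of A's queue: sweeping the step-s segment visits its fresh nodes and queues their children
lemma loopA_level (g : List (Int × List Int)) (s : Int) (F : List Int) :
    ∀ (N : List Int) (V : PySem.Set Int) (a : Int),
    (∀ u ∈ F, u ∉ V → (pvAdj? g u).isSome = true) →
    bfsLoopA g (F.map (fun u => (u, s)) ++ N.map (fun u => (u, s + 1))) V a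
      = bfsLoopA g ((N ++ (pvNew V F).flatMap (pvAdjD g)).map (fun u => (u, s + 1)))
          (PySem.Set.update V (pvNew V F)) (a + s * ((pvNew V F).length : Int)) := by
  induction F with
  | nil => intro N V a _; simp [pvNew, PySem.Set.update_nil]
  | cons u F ih =>
    intro N V a hk
    simp only [List.map_cons, List.cons_append]
    by_cases h1 : u ∈ V
    · rw [bfsLoopA_cons_visited s _ a h1]
      rw [ih N V a (fun x hx => hk x (List.mem_cons_of_mem _ hx))]
      simp [pvNew, h1]
    · have hs := hk u List.mem_cons_self h1
      obtain ⟨ch, h2⟩ := Option.isSome_iff_exists.mp hs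
      rw [bfsLoopA_cons_new s _ a h1 h2]
      have hq : (F.map (fun x => (x, s)) ++ N.map (fun x => (x, s + 1)))
            ++ ch.map (fun c => (c, s + 1))
          = F.map (fun x => (x, s)) ++ (N ++ ch).map (fun x => (x, s + 1)) := by
        simp [List.map_append, List.append_assoc]
      rw [hq, ih (N ++ ch) (PySem.Set.add V u) (a + s)
        (fun x hx hc => hk x (List.mem_cons_of_mem _ hx) (pvNotMem_add hc))]
      have hnew : pvNew V (u :: F) = u :: pvNew (PySem.Set.add V u) F := by
        simp [pvNew, h1]
      rw [hnew]
      have hadj : pvAdjD g u = ch := by simp [pvAdjD, h2]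
      simp only [List.flatMap_cons, hadj, PySem.Set.update_cons, List.length_cons,
        List.append_assoc]
      congr 1
      push_cast
      ring

-- main bridge: A's queue loop started on a one-level queue equals B's level loop
lemma pvMainA (g : List (Int × List Int))
    (hclosed : ∀ p ∈ g, ∀ v ∈ p.2, (pvAdj? g v).isSome = true) :
    ∀ (m : Nat) (F : List Int) (V : PySem.Set Int) (a s : Int),
    pvUC g V ≤ m →
    (∀ u ∈ F, (pvAdj? g u).isSome = true) →
    bfsLoopA g (F.map (fun u => (u, s))) V a
      = bLoopB g (pvNew V F) (PySem.Set.update V (pvNew V F)) s a := by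
  intro m
  induction m with
  | zero =>
    intro F V a s hm hF
    rcases hP : pvNew V F with _ | ⟨e, P'⟩
    · have hl := loopA_level g s F [] V a (fun u hu _ => hF u hu)
      simp only [List.map_nil, List.append_nil, List.nil_append] at hl
      rw [hl, hP]
      simp [bfsLoopA_nil, bLoopB_nil, PySem.Set.update_nil]
    · exfalso
      have he : e ∈ pvNew V F := by rw [hP]; exact List.mem_cons_self
      obtain ⟨heF, heV⟩ := pvNew_sub he
      obtain ⟨ch, hch⟩ := Option.isSome_iff_exists.mp (hF e heF)
      have hlt : pvUC g (PySem.Set.update V (pvNew V F)) < pvUC g V := by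
        refine pvUC_lt g V _ ?_ e (pvMem_univ_of_adj?_some hch) heV ?_
        · intro x hx; exact (PySem.Set.mem_update V _ x).mpr (Or.inl hx)
        · exact (PySem.Set.mem_update V _ e).mpr (Or.inr he)
      omega
  | succ m ih =>
    intro F V a s hm hF
    rcases hP : pvNew V F with _ | ⟨e, P'⟩
    · have hl := loopA_level g s F [] V a (fun u hu _ => hF u hu)
      simp only [List.map_nil, List.append_nil, List.nil_append] at hl
      rw [hl, hP]
      simp [bfsLoopA_nil, bLoopB_nil, PySem.Set.update_nil]
    · have he : e ∈ pvNew V F := by rw [hP]; exact List.mem_cons_self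
      obtain ⟨heF, heV⟩ := pvNew_sub he
      obtain ⟨ch, hch⟩ := Option.isSome_iff_exists.mp (hF e heF)
      have hlt : pvUC g (PySem.Set.update V (pvNew V F)) < pvUC g V := by
        refine pvUC_lt g V _ ?_ e (pvMem_univ_of_adj?_some hch) heV ?_
        · intro x hx; exact (PySem.Set.mem_update V _ x).mpr (Or.inl hx)
        · exact (PySem.Set.mem_update V _ e).mpr (Or.inr he)
      have hl := loopA_level g s F [] V a (fun u hu _ => hF u hu)
      simp only [List.map_nil, List.append_nil, List.nil_append] at hl
      rw [hl]
      rw [ih ((pvNew V F).flatMap (pvAdjD g)) (PySem.Set.update V (pvNew V F))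
        (a + s * ((pvNew V F).length : Int)) (s + 1) (by omega)
        (fun x hx => by
          obtain ⟨v, hv, hxv⟩ := List.mem_flatMap.mp hx
          exact pvAdj?_closed hclosed hxv)]
      rw [bLoopB_cons _ s a (List.cons_ne_nil _ _)]
      rw [bOuter_eq]
      simp only [List.nil_append]
      rw [hP]

lemma pvIsSome_of_mem_keys {g : List (Int × List Int)} {u : Int}
    (h : u ∈ g.map Prod.fst) : (pvAdj? g u).isSome = true := by
  rw [← Option.ne_none_iff_isSome]
  intro hnone
  have := (PySem.Dict.get?_eq_none_iff_not_mem_keys (PySem.Dict.mk g) u).mp hnone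
  exact this (by simpa [PySem.Dict.keys] using h)

-- pigeonhole: if the distinct keys inside [1, n] number exactly n, every i in [1, n] is a key
lemma pvPre1_keys {g : List (Int × List Int)} {n : Int}
    (h : ((((PySem.Set.ofList (g.map Prod.fst)).filter
        (fun k => decide (1 ≤ k ∧ k ≤ n))).length : Int) = n))
    {i : Int} (h1 : 1 ≤ i) (h2 : i ≤ n) : (pvAdj? g i).isSome = true := by
  set S : List Int := (PySem.Set.ofList (g.map Prod.fst)).filter
      (fun k => decide (1 ≤ k ∧ k ≤ n)) with hS
  have hnd : S.Nodup := List.Nodup.filter _ (PySem.Set.nodup_ofList _)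
  have hsub : S.toFinset ⊆ Finset.Icc (1 : Int) n := by
    intro x hx
    have hx' := List.mem_toFinset.mp hx
    rw [hS, List.mem_filter] at hx'
    have := of_decide_eq_true hx'.2
    exact Finset.mem_Icc.mpr this
  have hn0 : (0 : Int) ≤ n := le_trans (le_trans zero_le_one h1) h2
  have hcard : (Finset.Icc (1 : Int) n).card = n.toNat := by
    rw [Int.card_Icc]; omega
  have hlen : S.length = n.toNat := by omega
  have hScard : S.toFinset.card = n.toNat := by
    rw [List.toFinset_card_of_nodup hnd, hlen]
  have heq : S.toFinset = Finset.Icc (1 : Int) n :=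
    Finset.eq_of_subset_of_card_le hsub (by omega)
  have hiS : i ∈ S := by
    rw [← List.mem_toFinset, heq]
    exact Finset.mem_Icc.mpr ⟨h1, h2⟩
  rw [hS, List.mem_filter] at hiS
  exact pvIsSome_of_mem_keys ((PySem.Set.mem_ofList _ _).mp hiS.1)

-- ===== VERDICT (by name: the statement is the Claim_ definition above) =====
theorem bfs_spec : Claim_equal_bfs := by
  intro g n _ hpre
  show bfs g n = bfs_alt g n
  unfold bfs bfs_alt
  rcases hpre with hn | ⟨h1, h2⟩
  · rw [PySem.List.pyRange_one_eq_nil (by omega)]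
    rfl
  rw [PySem.List.foldl_append_singleton_eq_map]
  simp only [List.nil_append]
  apply List.map_congr_left
  intro i hi
  obtain ⟨hi1, hi2⟩ := PySem.List.mem_pyRange_one.mp hi
  have hi' := pvPre1_keys h1 hi1 (by omega)
  have h0 : [((i : Int), (0 : Int))] = [i].map (fun u => (u, (0 : Int))) := rfl
  rw [h0, pvMainA g h2 (pvUC g PySem.Set.empty) [i] PySem.Set.empty 0 0 le_rfl
    (by intro u hu; simp at hu; subst hu; exact hi')]
  rfl
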